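-- pv_equiv track=rewrite | github.com/sheshbazzarr/a2sv_community_education | .history/B_Long_Long_20240803113123.py | solve
-- ===== SOURCE A (Python) =====
-- def solve(test_cases):
--     results = []
--     for case in test_cases:
--         n, arr = case
--         max_sum = 0
--         operations = 0
--         negative_segment = False
--
--         for num in arr:
--             if num > 0:
--                 max_sum += num
--                 negative_segment = False
--             elif num < 0:
--                 if not negative_segment:
--                     operations += 1
--                 negative_segment = True
--
--         results.append(f"{max_sum} {operations}")
--
--     return results
-- ===== SOURCE B (Python) =====
-- def solve(test_cases):
--     results = []
--     for case in test_cases: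
--         n, arr = case
--         max_sum = sum(x for x in arr if x > 0)
--         nz = [x for x in arr if x != 0]
--         # a negative run starts where cur < 0 and the previous nonzero value was >= 0
--         operations = sum(1 for prev, cur in zip([1] + nz, nz) if cur < 0 <= prev)
--         results.append(f"{max_sum} {operations}")
--     return results
-- ===== Notes on version B (the rewrite author's own statement) =====
-- stated objective: idiomatic
-- what changed: Replaces the single stateful flag-pass with a filter-then-scan decomposition: max_sum is a comprehension over positives, and negative segments are counted on the zero-filtered sequence by pairing each element with its predecessor and counting run starts.
import Mathlib
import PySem

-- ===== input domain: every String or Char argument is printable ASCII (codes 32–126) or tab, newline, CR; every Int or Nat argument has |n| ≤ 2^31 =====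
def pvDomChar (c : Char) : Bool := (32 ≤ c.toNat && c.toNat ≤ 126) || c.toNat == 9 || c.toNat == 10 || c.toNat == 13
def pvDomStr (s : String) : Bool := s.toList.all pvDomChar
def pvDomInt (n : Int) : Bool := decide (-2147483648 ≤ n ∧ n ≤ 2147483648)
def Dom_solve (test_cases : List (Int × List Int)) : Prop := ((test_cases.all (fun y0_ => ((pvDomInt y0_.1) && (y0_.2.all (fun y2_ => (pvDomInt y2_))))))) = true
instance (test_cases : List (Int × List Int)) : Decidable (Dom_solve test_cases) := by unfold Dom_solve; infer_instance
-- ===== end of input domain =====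

-- B replaces A's one stateful flag-pass by filtering (positives summed; zeros dropped) and counting
-- negative-run starts against each element's predecessor — same cost, a different decomposition.

-- ===== PORT A =====
-- A's inner loop state: (max_sum, operations, negative_segment)
def solveInner (arr : List Int) : Int × Int × Bool :=
  arr.foldl (fun st num =>
    if num > 0 then (st.1 + num, st.2.1, false)
    else if num < 0 then
      (st.1, (if st.2.2 then st.2.1 else st.2.1 + 1), true)
    else st) (0, 0, false)

def solve (test_cases : List (Int × List Int)) : List String :=
  test_cases.foldl (fun results case =>
    let st := solveInner case.2
    results ++ [PySem.Int.toStr st.1 ++ " " ++ PySem.Int.toStr st.2.1]) []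

-- ===== PORT B =====
def solve_alt (test_cases : List (Int × List Int)) : List String :=
  test_cases.foldl (fun results case =>
    let arr := case.2
    let maxSum : Int := (arr.filter (fun x => x > 0)).sum
    let nz := arr.filter (fun x => x ≠ 0)
    let operations : Int :=
      ((((1 : Int) :: nz).zip nz).countP (fun p => p.2 < 0 && 0 ≤ p.1) : Nat)
    results ++ [PySem.Int.toStr maxSum ++ " " ++ PySem.Int.toStr operations]) []

-- ===== PRECONDITION & SPEC =====
def Spec_solve (test_cases : List (Int × List Int)) (out : List String) : Prop := out = solve_alt test_cases
instance (test_cases : List (Int × List Int)) (out : List String) : Decidable (Spec_solve test_cases out) := by unfold Spec_solve; infer_instance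

-- ===== CLAIM (what is proved, stated in full; the proofs are below) =====
def Claim_equal_solve : Prop := ∀ (test_cases : List (Int × List Int)), Dom_solve test_cases → Spec_solve test_cases (solve test_cases)

-- ===== LEMMAS AND PROOFS =====

-- count of negative-run starts with incoming flag f (zeros transparent), as A's loop maintains it
def cntA (f : Bool) : List Int → Nat
  | [] => 0
  | x :: xs =>
    if x > 0 then cntA false xs
    else if x < 0 then (if f then 0 else 1) + cntA true xs
    else cntA f xs

lemma solveInner_char (arr : List Int) :
    ∀ s o (f : Bool),
      (arr.foldl (fun st num =>
        if num > 0 then (st.1 + num, st.2.1, false)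
        else if num < 0 then
          (st.1, (if st.2.2 then st.2.1 else st.2.1 + 1), true)
        else st) ((s, o, f) : Int × Int × Bool)).1
        = s + (arr.filter (fun x => x > 0)).sum
    ∧ (arr.foldl (fun st num =>
        if num > 0 then (st.1 + num, st.2.1, false)
        else if num < 0 then
          (st.1, (if st.2.2 then st.2.1 else st.2.1 + 1), true)
        else st) ((s, o, f) : Int × Int × Bool)).2.1
        = o + (cntA f arr : Nat) := by
  induction arr with
  | nil => intro s o f; simp [cntA]
  | cons x xs ih =>
    intro s o f
    by_cases hx : x > 0
    · have := ih (s + x) o false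
      simp [List.foldl_cons, hx, cntA, this.1, this.2]
      ring
    · by_cases hx' : x < 0
      · have := ih s (if f then o else o + 1) true
        simp [List.foldl_cons, hx, hx', cntA, this.1, this.2]
        cases f <;> simp [add_assoc]
      · have := ih s o f
        simp [List.foldl_cons, hx, hx', cntA, this.1, this.2]

-- cntA only looks at nonzero entries
lemma cntA_filter (arr : List Int) : ∀ f, cntA f arr = cntA f (arr.filter (fun x => x ≠ 0)) := by
  induction arr with
  | nil => intro f; simp
  | cons x xs ih =>
    intro f
    by_cases hx : x > 0
    · have hne : x ≠ 0 := by omega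
      simp [cntA, hx, hne, ih]
    · by_cases hx' : x < 0
      · have hne : x ≠ 0 := by omega
        simp [cntA, hx, hx', hne, ih]
      · have hz : x = 0 := by omega
        simp [cntA, hz, ih]

-- B's predecessor-pair count equals cntA with the flag 'previous value was negative'
lemma zip_count (nz : List Int) (hnz : ∀ x ∈ nz, x ≠ 0) :
    ∀ prev : Int,
      ((prev :: nz).zip nz).countP (fun p => p.2 < 0 && 0 ≤ p.1) = cntA (decide (prev < 0)) nz := by
  induction nz with
  | nil => intro prev; simp [cntA]
  | cons x xs ih0 =>
    have ih := ih0 (fun y hy => hnz y (List.mem_cons_of_mem _ hy))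
    intro prev
    by_cases hx : x > 0
    · have h0 : ¬ x < 0 := by omega
      simp [List.zip_cons_cons, cntA, hx, h0, ih x]
    · by_cases hx' : x < 0
      · have h0 : ¬ x > 0 := by omega
        by_cases hp : prev < 0
        · simp [List.zip_cons_cons, cntA, hx', h0, hp, ih x, not_le.mpr hp]
        · simp [List.zip_cons_cons, cntA, hx', h0, hp, ih x, not_lt.mp hp]
          omega
      · exact absurd (by omega) (hnz x (List.mem_cons_self))

lemma case_eq (arr : List Int) :
    (PySem.Int.toStr (solveInner arr).1 ++ " " ++ PySem.Int.toStr (solveInner arr).2.1)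
      = (PySem.Int.toStr ((arr.filter (fun x => x > 0)).sum)
          ++ " "
          ++ PySem.Int.toStr
            (((((1 : Int) :: arr.filter (fun x => x ≠ 0)).zip (arr.filter (fun x => x ≠ 0))).countP
                (fun p => p.2 < 0 && 0 ≤ p.1) : Nat))) := by
  have h := solveInner_char arr 0 0 false
  have hz := zip_count (arr.filter (fun x => x ≠ 0)) (by simp) 1
  have hf := cntA_filter arr false
  simp only [solveInner, h.1, h.2, hz, zero_add]
  simp only [ne_eq, decide_not] at hf
  norm_num at hz ⊢
  rw [hf]

lemma fold_eq (tcs : List (Int × List Int)) :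
    ∀ res : List String,
      tcs.foldl (fun results case =>
        let st := solveInner case.2
        results ++ [PySem.Int.toStr st.1 ++ " " ++ PySem.Int.toStr st.2.1]) res
      = tcs.foldl (fun results case =>
          let arr := case.2
          let maxSum : Int := (arr.filter (fun x => x > 0)).sum
          let nz := arr.filter (fun x => x ≠ 0)
          let operations : Int :=
            ((((1 : Int) :: nz).zip nz).countP (fun p => p.2 < 0 && 0 ≤ p.1) : Nat)
          results ++ [PySem.Int.toStr maxSum ++ " " ++ PySem.Int.toStr operations]) res := by
  induction tcs with
  | nil => intro res; rfl
  | cons c cs ih =>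
    intro res
    simp only [List.foldl_cons]
    rw [case_eq c.2]
    exact ih _

-- ===== VERDICT (by name: the statement is the Claim_ definition above) =====
theorem solve_spec : Claim_equal_solve := by
  intro tcs _
  unfold Spec_solve solve solve_alt
  exact fold_eq tcs []
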